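-- pv_equiv track=rewrite | github.com/dimipash/python-algorithms | double_linear_search.py | search
-- ===== SOURCE A (Python) =====
-- from typing import List, Optional, Tuple
--
-- def search(
--     list1: List[int], list2: List[int], target: int
-- ) -> Optional[Tuple[int, int]]:
--     """
--     Searches for target value in both lists simultaneously.
--
--     Args:
--         list1: First list to search
--         list2: Second list to search
--         target: Value to find
--
--     Returns:
--         Tuple of (list_number, index) if found, None otherwise
--         list_number is 1 or 2 indicating which list contained the target
--
--     Raises:
--         ValueError: If lists have different lengths
--     """
--     if len(list1) != len(list2):
--         raise ValueError("Lists must have equal length")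
--
--     for i in range(len(list1)):
--         if list1[i] == target:
--             return (1, i)
--         if list2[i] == target:
--             return (2, i)
--
--     return None
-- ===== SOURCE B (Python) =====
-- from typing import List, Optional, Tuple
--
-- def search(
--     list1: List[int], list2: List[int], target: int
-- ) -> Optional[Tuple[int, int]]:
--     if len(list1) != len(list2):
--         raise ValueError("Lists must have equal length")
--     i1 = list1.index(target) if target in list1 else None
--     i2 = list2.index(target) if target in list2 else None
--     if i1 is not None and i2 is not None:
--         return (1, i1) if i1 <= i2 else (2, i2)
--     if i1 is not None:
--         return (1, i1)
--     if i2 is not None: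
--         return (2, i2)
--     return None
-- ===== Notes on version B (the rewrite author's own statement) =====
-- stated objective: alternative
-- what changed: Replaces the interleaved per-index loop with two independent first-occurrence lookups (list.index) combined by an index comparison with i1<=i2 tie-break reproducing list1 priority.
import Mathlib
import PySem

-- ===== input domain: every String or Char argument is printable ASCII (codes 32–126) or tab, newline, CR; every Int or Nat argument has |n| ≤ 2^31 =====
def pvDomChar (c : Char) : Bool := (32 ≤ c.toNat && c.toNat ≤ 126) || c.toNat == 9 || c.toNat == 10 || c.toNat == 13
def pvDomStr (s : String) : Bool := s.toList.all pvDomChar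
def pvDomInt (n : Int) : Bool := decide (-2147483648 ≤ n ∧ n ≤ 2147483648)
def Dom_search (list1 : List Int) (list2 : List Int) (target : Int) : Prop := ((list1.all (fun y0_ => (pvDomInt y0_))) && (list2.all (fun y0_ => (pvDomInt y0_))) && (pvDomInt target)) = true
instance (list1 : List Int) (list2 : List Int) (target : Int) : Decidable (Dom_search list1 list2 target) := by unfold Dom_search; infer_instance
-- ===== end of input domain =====

-- B replaces A's interleaved per-index loop with two independent first-occurrence
-- lookups combined by comparing the indices (i1 ≤ i2 keeps list1 priority on ties).
-- Equivalence is about the RETURN value; A raises ValueError on unequal lengths (excluded by Pre_).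

-- ===== PORT A =====
-- the for-i loop over both lists: structural recursion peeling both lists in step,
-- returning the index relative to the current position (shifted by +1 per step)
def searchGo (target : Int) : List Int → List Int → Option (Int × Nat)
  | x :: xs, y :: ys =>
    if x = target then some (1, 0)
    else if y = target then some (2, 0)
    else (searchGo target xs ys).map (fun p => (p.1, p.2 + 1))
  | _, _ => none

def search (list1 : List Int) (list2 : List Int) (target : Int) : Option (Int × Int) :=
  (searchGo target list1 list2).map (fun p => (p.1, (p.2 : Int)))

-- ===== PORT B =====
def search_alt (list1 : List Int) (list2 : List Int) (target : Int) : Option (Int × Int) :=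
  match PySem.List.index? list1 target, PySem.List.index? list2 target with
  | some a, some b => if a ≤ b then some (1, (a : Int)) else some (2, (b : Int))
  | some a, none => some (1, (a : Int))
  | none, some b => some (2, (b : Int))
  | none, none => none

-- ===== PRECONDITION & SPEC =====
-- A raises ValueError when the lists have different lengths; Pre_ excludes exactly those inputs.
def Pre_search (list1 : List Int) (list2 : List Int) (target : Int) : Prop :=
  list1.length = list2.length
instance (list1 : List Int) (list2 : List Int) (target : Int) : Decidable (Pre_search list1 list2 target) := by unfold Pre_search; infer_instance
def pvWitness_search : List Int × List Int × Int := ([1, 2], [3, 2], 2)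

def Spec_search (list1 : List Int) (list2 : List Int) (target : Int) (out : Option (Int × Int)) : Prop := out = search_alt list1 list2 target
instance (list1 : List Int) (list2 : List Int) (target : Int) (out : Option (Int × Int)) : Decidable (Spec_search list1 list2 target out) := by unfold Spec_search; infer_instance

-- ===== CLAIM (what is proved, stated in full; the proofs are below) =====
def Claim_equal_search : Prop := ∀ (list1 : List Int) (list2 : List Int) (target : Int), Dom_search list1 list2 target → Pre_search list1 list2 target → Spec_search list1 list2 target (search list1 list2 target)

-- ===== LEMMAS AND PROOFS =====

-- comb is the combining step of B; searchGo_eq says A's loop equals B's combination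
def comb (i1 i2 : Option Nat) : Option (Int × Nat) :=
  match i1, i2 with
  | some a, some b => if a ≤ b then some (1, a) else some (2, b)
  | some a, none => some (1, a)
  | none, some b => some (2, b)
  | none, none => none

theorem searchGo_eq (target : Int) (l1 l2 : List Int) (h : l1.length = l2.length) :
    searchGo target l1 l2 = comb (PySem.List.index? l1 target) (PySem.List.index? l2 target) := by
  induction l1 generalizing l2 with
  | nil =>
    cases l2 with
    | nil => simp [searchGo, PySem.List.index?_eq_idxOf?, List.idxOf?, comb]
    | cons y ys => simp at h
  | cons x xs ih =>
    cases l2 with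
    | nil => simp at h
    | cons y ys =>
      simp at h
      by_cases hx : x = target
      · subst hx
        rw [searchGo, PySem.List.index?_cons_self]
        simp only [comb]
        cases hi2 : List.idxOf? x (y :: ys) <;> simp [hi2]
      · rw [searchGo, PySem.List.index?_cons_of_ne xs hx]
        by_cases hy : y = target
        · subst hy
          rw [PySem.List.index?_cons_self]
          simp only [if_neg hx, comb]
          cases hi1 : List.idxOf? y xs <;> simp [hi1]
        · rw [PySem.List.index?_cons_of_ne ys hy, ih ys h]
          simp only [if_neg hx, if_neg hy, comb]
          cases h1 : List.idxOf? target xs <;> cases h2 : List.idxOf? target ys <;>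
            simp [h1, h2] <;> split_ifs <;> simp

-- ===== VERDICT (by name: the statement is the Claim_ definition above) =====
theorem search_spec : Claim_equal_search := by
  intro l1 l2 t _ hpre
  unfold Spec_search search search_alt
  rw [searchGo_eq t l1 l2 hpre]
  cases h1 : List.idxOf? t l1 <;> cases h2 : List.idxOf? t l2 <;>
    simp [comb, PySem.List.index?_eq_idxOf?, h1, h2] <;> split_ifs <;> simp
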